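-- pv_equiv track=rewrite | github.com/gyorilab/openacme | openacme/icd10/map_definitions.py | get_best_definition
-- ===== SOURCE A (Python) =====
-- SOURCE_PRIORITY = ["MSH", "CSP", "NCI", "HPO", "SNOMEDCT_US", "MEDLINEPLUS"]
--
-- def get_best_definition(cuis, cui_to_definitions, source_priority=SOURCE_PRIORITY):
--     """Get best definition from CUIs based on source priority.
--
--     Parameters
--     ----------
--     cuis : set
--         Set of CUI identifiers to search for definitions.
--     cui_to_definitions : dict
--         Dictionary mapping CUIs to lists of (source, definition) tuples.
--     source_priority : list, optional
--         List of source abbreviations in priority order.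
--         Defaults to SOURCE_PRIORITY.
--
--     Returns
--     -------
--     tuple
--         Tuple of (best_definition, best_source) or (None, None) if not found.
--     """
--     best_def = None
--     best_source = None
--     best_priority = float("inf")
--
--     for cui in cuis:
--         if cui in cui_to_definitions:
--             for sab, definition in cui_to_definitions[cui]:
--                 priority = len(source_priority)
--                 if sab in source_priority:
--                     priority = source_priority.index(sab)
--                 if priority < best_priority:
--                     best_priority = priority
--                     best_def = definition
--                     best_source = sab
--
--     return best_def, best_source
-- ===== SOURCE B (Python) =====
-- SOURCE_PRIORITY = ["MSH", "CSP", "NCI", "HPO", "SNOMEDCT_US", "MEDLINEPLUS"]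
--
--
-- def get_best_definition(cuis, cui_to_definitions, source_priority=SOURCE_PRIORITY):
--     """Get best definition from CUIs based on source priority.
--
--     Searches sources in priority order with early exit instead of tracking
--     a running minimum: for each priority source in turn, return the first
--     (definition, source) pair coming from it; finally fall back to the first
--     pair whose source is not listed at all.
--     """
--     def find_first(pred):
--         for cui in cuis:
--             defs = cui_to_definitions.get(cui)
--             if defs is not None:
--                 for sab, definition in defs:
--                     if pred(sab):
--                         return definition, sab
--         return None
--
--     for target in source_priority:
--         hit = find_first(lambda sab: sab == target)
--         if hit is not None:
--             return hit
--     hit = find_first(lambda sab: sab not in source_priority)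
--     if hit is not None:
--         return hit
--     return None, None
-- ===== Notes on version B (the rewrite author's own statement) =====
-- stated objective: alternative
-- what changed: Replaces the single running-minimum pass (tracking best_priority across all CUIs' definitions) with a search by priority rank: scan once per priority source in preference order and return the first hit, with one final scan for unlisted sources; early exit replaces the global-minimum accumulator.
import Mathlib
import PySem

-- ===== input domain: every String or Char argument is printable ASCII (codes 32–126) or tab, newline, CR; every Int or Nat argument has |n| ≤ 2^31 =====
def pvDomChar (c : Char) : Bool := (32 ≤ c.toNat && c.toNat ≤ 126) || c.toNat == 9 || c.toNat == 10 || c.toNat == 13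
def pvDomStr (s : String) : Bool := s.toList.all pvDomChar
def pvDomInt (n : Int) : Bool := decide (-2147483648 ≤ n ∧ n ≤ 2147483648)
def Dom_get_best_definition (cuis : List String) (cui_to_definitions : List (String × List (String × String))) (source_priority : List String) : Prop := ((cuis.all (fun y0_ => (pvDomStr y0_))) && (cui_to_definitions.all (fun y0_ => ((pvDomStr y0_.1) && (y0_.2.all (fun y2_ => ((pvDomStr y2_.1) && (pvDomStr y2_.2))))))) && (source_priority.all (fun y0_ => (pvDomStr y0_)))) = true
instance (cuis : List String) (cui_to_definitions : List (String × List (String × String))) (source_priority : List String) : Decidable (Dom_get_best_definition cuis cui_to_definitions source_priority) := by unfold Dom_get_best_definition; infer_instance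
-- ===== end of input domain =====

-- B replaces A's running-minimum pass with a search in priority order (one scan per
-- priority source, early exit, final scan for unlisted sources): an alternative
-- decomposition of the same task, proved to return the same pair on every input.

-- ===== PORT A =====
-- A's `best_priority = float("inf")` is modelled by len(source_priority)+1: every
-- candidate priority is ≤ len(source_priority), so the strict comparison behaves
-- identically; state is (best_def, best_source, best_priority).
def get_best_definition (cuis : List String) (cui_to_definitions : List (String × List (String × String))) (source_priority : List String) : Option String × Option String :=
  let st := cuis.foldl
    (fun (st : Option String × Option String × Int) cui =>
      match (PySem.Dict.mk cui_to_definitions).get? cui with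
      | none => st
      | some defs =>
        List.foldl
          (fun (st : Option String × Option String × Int) (p : String × String) =>
            let priority : Int :=
              match PySem.List.index? source_priority p.1 with
              | some i => (i : Int)
              | none => (source_priority.length : Int)
            if priority < st.2.2 then (some p.2, some p.1, priority) else st)
          st defs)
    (none, none, (source_priority.length : Int) + 1)
  (st.1, st.2.1)

-- ===== PORT B =====
-- find_first: first (definition, sab) over the cuis' definition lists with pred sab
def pvFindFirst (cuis : List String) (cui_to_definitions : List (String × List (String × String))) (pred : String → Bool) : Option (String × String) :=
  match cuis with
  | [] => none
  | c :: cs =>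
    match (PySem.Dict.mk cui_to_definitions).get? c with
    | none => pvFindFirst cs cui_to_definitions pred
    | some defs =>
      match List.find? (fun (p : String × String) => pred p.1) defs with
      | some p => some (p.2, p.1)
      | none => pvFindFirst cs cui_to_definitions pred

-- the `for target in source_priority` loop, then the unlisted-source fallback
def pvSearch (cuis : List String) (cui_to_definitions : List (String × List (String × String))) (source_priority : List String) (ts : List String) : Option String × Option String :=
  match ts with
  | [] =>
    match pvFindFirst cuis cui_to_definitions (fun sab => !source_priority.contains sab) with
    | some r => (some r.1, some r.2)
    | none => (none, none)
  | t :: ts' =>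
    match pvFindFirst cuis cui_to_definitions (fun sab => sab == t) with
    | some r => (some r.1, some r.2)
    | none => pvSearch cuis cui_to_definitions source_priority ts'

def get_best_definition_alt (cuis : List String) (cui_to_definitions : List (String × List (String × String))) (source_priority : List String) : Option String × Option String :=
  pvSearch cuis cui_to_definitions source_priority source_priority

-- ===== PRECONDITION & SPEC =====
def Spec_get_best_definition (cuis : List String) (cui_to_definitions : List (String × List (String × String))) (source_priority : List String) (out : Option String × Option String) : Prop := out = get_best_definition_alt cuis cui_to_definitions source_priority
instance (cuis : List String) (cui_to_definitions : List (String × List (String × String))) (source_priority : List String) (out : Option String × Option String) : Decidable (Spec_get_best_definition cuis cui_to_definitions source_priority out) := by unfold Spec_get_best_definition; infer_instance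

-- ===== CLAIM (what is proved, stated in full; the proofs are below) =====
def Claim_equal_get_best_definition : Prop := ∀ (cuis : List String) (cui_to_definitions : List (String × List (String × String))) (source_priority : List String), Dom_get_best_definition cuis cui_to_definitions source_priority → Spec_get_best_definition cuis cui_to_definitions source_priority (get_best_definition cuis cui_to_definitions source_priority)

-- ===== LEMMAS AND PROOFS =====

-- priority of a source name, as A computes it
def pvPrio (sp : List String) (sab : String) : Int :=
  match PySem.List.index? sp sab with
  | some i => (i : Int)
  | none => (sp.length : Int)

-- the flattened stream of (sab, definition) entries both programs scan
def pvEntries (cuis : List String) (c2d : List (String × List (String × String))) : List (String × String) :=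
  cuis.flatMap (fun c => ((PySem.Dict.mk c2d).get? c).getD [])

def pvStepA (sp : List String) (st : Option String × Option String × Int) (p : String × String) : Option String × Option String × Int :=
  if pvPrio sp p.1 < st.2.2 then (some p.2, some p.1, pvPrio sp p.1) else st

-- minimum priority over L, with base p0
def pvMin (sp : List String) (L : List (String × String)) (p0 : Int) : Int :=
  L.foldl (fun a p => min a (pvPrio sp p.1)) p0

-- the common reference value: first entry achieving the minimal priority
def pvBest (sp : List String) (L : List (String × String)) : Option String × Option String :=
  match L.find? (fun p => pvPrio sp p.1 == pvMin sp L ((sp.length : Int) + 1)) with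
  | some p => (some p.2, some p.1)
  | none => (none, none)

theorem pvPrio_nonneg (sp : List String) (s : String) : 0 ≤ pvPrio sp s := by
  unfold pvPrio; cases h : PySem.List.index? sp s <;> simp

theorem pvPrio_le (sp : List String) (s : String) : pvPrio sp s ≤ (sp.length : Int) := by
  unfold pvPrio
  cases h : PySem.List.index? sp s with
  | none => simp
  | some k =>
    obtain ⟨hk, -, -⟩ := PySem.List.getElem_of_index?_eq_some h
    simp; omega

theorem pvMin_le_base (sp : List String) (L : List (String × String)) (p0 : Int) :
    pvMin sp L p0 ≤ p0 := by
  induction L generalizing p0 with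
  | nil => simp [pvMin]
  | cons p rest ih =>
    have := ih (min p0 (pvPrio sp p.1))
    simp only [pvMin, List.foldl_cons] at *
    omega

theorem pvMin_le_mem (sp : List String) (L : List (String × String)) :
    ∀ (p0 : Int) (q : String × String), q ∈ L → pvMin sp L p0 ≤ pvPrio sp q.1 := by
  induction L with
  | nil => intro _ _ hq; cases hq
  | cons p rest ih =>
    intro p0 q hq
    have h2 : pvMin sp (p :: rest) p0 = pvMin sp rest (min p0 (pvPrio sp p.1)) := rfl
    rcases List.mem_cons.mp hq with h | h
    · have h1 := pvMin_le_base sp rest (min p0 (pvPrio sp p.1))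
      subst h
      omega
    · have := ih (min p0 (pvPrio sp p.1)) q h
      omega

theorem pvMin_lb (sp : List String) (L : List (String × String)) (c : Int) :
    ∀ (p0 : Int), c ≤ p0 → (∀ q ∈ L, c ≤ pvPrio sp q.1) → c ≤ pvMin sp L p0 := by
  induction L with
  | nil => intro p0 hb _; simpa [pvMin]
  | cons p rest ih =>
    intro p0 hb hm
    have h1 : c ≤ pvPrio sp p.1 := hm p (by simp)
    have h2 : pvMin sp (p :: rest) p0 = pvMin sp rest (min p0 (pvPrio sp p.1)) := rfl
    have := ih (min p0 (pvPrio sp p.1)) (by omega) (fun q hq => hm q (by simp [hq]))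
    omega

theorem pvMin_attained (sp : List String) (L : List (String × String)) :
    ∀ (p0 : Int), pvMin sp L p0 = p0 ∨ ∃ q ∈ L, pvPrio sp q.1 = pvMin sp L p0 := by
  induction L with
  | nil => intro p0; left; rfl
  | cons p rest ih =>
    intro p0
    have h2 : pvMin sp (p :: rest) p0 = pvMin sp rest (min p0 (pvPrio sp p.1)) := rfl
    rcases ih (min p0 (pvPrio sp p.1)) with h | ⟨q, hq, hqe⟩
    · by_cases hlt : pvPrio sp p.1 < p0
      · right; exact ⟨p, by simp, by omega⟩
      · left; omega
    · right; exact ⟨q, by simp [hq], by omega⟩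

theorem find?_congr_mem {α : Type} (l : List α) (p q : α → Bool)
    (h : ∀ a ∈ l, p a = q a) : l.find? p = l.find? q := by
  induction l with
  | nil => rfl
  | cons a t ih =>
    have ha := h a (by simp)
    simp only [List.find?_cons, ha]
    cases q a
    · exact ih (fun b hb => h b (by simp [hb]))
    · rfl

-- characterisation of A's running-minimum fold
theorem foldA_char (sp : List String) (L : List (String × String)) :
    ∀ (d0 s0 : Option String) (p0 : Int),
    L.foldl (pvStepA sp) (d0, s0, p0) =
      if pvMin sp L p0 = p0 then (d0, s0, p0)
      else
        match L.find? (fun p => pvPrio sp p.1 == pvMin sp L p0) with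
        | some p => (some p.2, some p.1, pvMin sp L p0)
        | none => (d0, s0, p0) := by
  induction L with
  | nil => intro d0 s0 p0; simp [pvMin]
  | cons p rest ih =>
    intro d0 s0 p0
    have hminc : pvMin sp (p :: rest) p0 = pvMin sp rest (min p0 (pvPrio sp p.1)) := rfl
    by_cases hlt : pvPrio sp p.1 < p0
    · have hm : pvMin sp (p :: rest) p0 = pvMin sp rest (pvPrio sp p.1) := by
        rw [hminc]; congr 1; omega
      have hstep : pvStepA sp (d0, s0, p0) p = (some p.2, some p.1, pvPrio sp p.1) := by
        simp [pvStepA, hlt]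
      have hle : pvMin sp rest (pvPrio sp p.1) ≤ pvPrio sp p.1 := pvMin_le_base ..
      rw [List.foldl_cons, hstep, ih]
      by_cases heq : pvMin sp rest (pvPrio sp p.1) = pvPrio sp p.1
      · rw [if_pos heq, if_neg (by omega : ¬ pvMin sp (p :: rest) p0 = p0)]
        have ht : (fun q => pvPrio sp q.1 == pvMin sp (p :: rest) p0) p = true := by
          simp only [beq_iff_eq]; omega
        rw [List.find?_cons_of_pos (p := fun q => pvPrio sp q.1 == pvMin sp (p :: rest) p0) (l := rest) ht]
        simp only []
        rw [hm, heq]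
      · rw [if_neg heq, if_neg (by omega : ¬ pvMin sp (p :: rest) p0 = p0)]
        have hf : ¬ (fun q => pvPrio sp q.1 == pvMin sp (p :: rest) p0) p = true := by
          simp only [beq_iff_eq]; omega
        rw [List.find?_cons_of_neg (p := fun q => pvPrio sp q.1 == pvMin sp (p :: rest) p0) (l := rest) hf, hm]
        rcases pvMin_attained sp rest (pvPrio sp p.1) with h | ⟨w, hw, hwe⟩
        · exact absurd h heq
        · cases hfind : List.find? (fun q => pvPrio sp q.1 == pvMin sp rest (pvPrio sp p.1)) rest with
          | none =>
            exfalso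
            have := List.find?_eq_none.mp hfind w hw
            simp only [beq_iff_eq] at this
            exact this hwe
          | some w' => rfl
    · have hm : pvMin sp (p :: rest) p0 = pvMin sp rest p0 := by
        rw [hminc]; congr 1; omega
      have hstep : pvStepA sp (d0, s0, p0) p = (d0, s0, p0) := by
        simp [pvStepA, hlt]
      rw [List.foldl_cons, hstep, ih, hm]
      by_cases heq : pvMin sp rest p0 = p0
      · simp [heq]
      · rw [if_neg heq, if_neg heq]
        have hle : pvMin sp rest p0 ≤ p0 := pvMin_le_base ..
        have hf : ¬ (fun q => pvPrio sp q.1 == pvMin sp rest p0) p = true := by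
          simp only [beq_iff_eq]; omega
        rw [List.find?_cons_of_neg (p := fun q => pvPrio sp q.1 == pvMin sp rest p0) (l := rest) hf]

-- A's nested loops = the fold over the flattened entry list
theorem foldA_flat (sp : List String) (c2d : List (String × List (String × String))) :
    ∀ (cuis : List String) (st : Option String × Option String × Int),
    List.foldl
      (fun (st : Option String × Option String × Int) cui =>
        match (PySem.Dict.mk c2d).get? cui with
        | none => st
        | some defs =>
          List.foldl
            (fun (st : Option String × Option String × Int) (p : String × String) =>
              let priority : Int :=
                match PySem.List.index? sp p.1 with
                | some i => (i : Int)
                | none => (sp.length : Int)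
              if priority < st.2.2 then (some p.2, some p.1, priority) else st)
            st defs) st cuis
    = List.foldl (pvStepA sp) st (pvEntries cuis c2d) := by
  have hfun : (fun (st : Option String × Option String × Int) (p : String × String) =>
      let priority : Int :=
        match PySem.List.index? sp p.1 with
        | some i => (i : Int)
        | none => (sp.length : Int)
      if priority < st.2.2 then (some p.2, some p.1, priority) else st) = pvStepA sp := by
    funext st p
    simp only [pvStepA, pvPrio]
  intro cuis
  induction cuis with
  | nil => intro st; rfl
  | cons c cs ih =>
    intro st
    have he : pvEntries (c :: cs) c2d
        = (((PySem.Dict.mk c2d).get? c).getD []) ++ pvEntries cs c2d := by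
      simp [pvEntries]
    rw [List.foldl_cons, he, List.foldl_append]
    cases h : (PySem.Dict.mk c2d).get? c with
    | none => simp only [Option.getD_none, List.foldl_nil]; exact ih st
    | some defs => simp only [Option.getD_some, hfun]; exact ih _

theorem portA_flat (cuis : List String) (c2d : List (String × List (String × String)))
    (sp : List String) :
    get_best_definition cuis c2d sp =
      (let st := (pvEntries cuis c2d).foldl (pvStepA sp) (none, none, (sp.length : Int) + 1)
       (st.1, st.2.1)) := by
  unfold get_best_definition
  rw [foldA_flat]

-- A = pvBest
theorem portA_best (cuis : List String) (c2d : List (String × List (String × String)))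
    (sp : List String) :
    get_best_definition cuis c2d sp = pvBest sp (pvEntries cuis c2d) := by
  rw [portA_flat]
  rw [foldA_char]
  set L := pvEntries cuis c2d with hL
  by_cases h : pvMin sp L ((sp.length : Int) + 1) = (sp.length : Int) + 1
  · have hnone : L.find? (fun p => pvPrio sp p.1 == (sp.length : Int) + 1) = none := by
      rw [List.find?_eq_none]
      intro q _
      have := pvPrio_le sp q.1
      simp only [beq_iff_eq]
      omega
    simp [pvBest, h, hnone]
  · rcases pvMin_attained sp L ((sp.length : Int) + 1) with h' | ⟨w, hw, hwe⟩
    · exact absurd h' h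
    · cases hfind : L.find? (fun p => pvPrio sp p.1 == pvMin sp L ((sp.length : Int) + 1)) with
      | none =>
        exfalso
        have := List.find?_eq_none.mp hfind w hw
        simp only [beq_iff_eq] at this
        exact this hwe
      | some w' => simp [pvBest, h, hfind]

-- B's find_first = find? on the flattened entry list
theorem findFirst_flat (c2d : List (String × List (String × String)))
    (pred : String → Bool) :
    ∀ (cuis : List String),
    pvFindFirst cuis c2d pred =
      ((pvEntries cuis c2d).find? (fun p => pred p.1)).map (fun p => (p.2, p.1)) := by
  intro cuis
  induction cuis with
  | nil => rfl
  | cons c cs ih =>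
    have he : pvEntries (c :: cs) c2d
        = (((PySem.Dict.mk c2d).get? c).getD []) ++ pvEntries cs c2d := by
      simp [pvEntries]
    rw [pvFindFirst, he, List.find?_append]
    cases h : (PySem.Dict.mk c2d).get? c with
    | none => simpa [h] using ih
    | some defs =>
      simp only [h, Option.getD_some]
      cases hf : List.find? (fun (p : String × String) => pred p.1) defs with
      | none => simpa [hf] using ih
      | some p => simp [hf]

-- B's per-target search, abstracted over the flattened entry list
def pvGoB (sp : List String) (L : List (String × String)) : List String → Option String × Option String
  | [] =>
    match L.find? (fun p => !sp.contains p.1) with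
    | some p => (some p.2, some p.1)
    | none => (none, none)
  | t :: ts =>
    match L.find? (fun p => p.1 == t) with
    | some p => (some p.2, some p.1)
    | none => pvGoB sp L ts

theorem pvSearch_eq_goB (cuis : List String) (c2d : List (String × List (String × String)))
    (sp : List String) :
    ∀ (ts : List String), pvSearch cuis c2d sp ts = pvGoB sp (pvEntries cuis c2d) ts := by
  intro ts
  induction ts with
  | nil =>
    rw [pvSearch, pvGoB, findFirst_flat]
    cases hf : (pvEntries cuis c2d).find? (fun p => !sp.contains p.1) <;> simp [hf]
  | cons t ts ih =>
    rw [pvSearch, pvGoB, findFirst_flat]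
    cases hf : (pvEntries cuis c2d).find? (fun p => p.1 == t) <;> simp [hf, ih]

theorem pvPrio_lt_of_mem (sp : List String) (s : String) (h : s ∈ sp) :
    pvPrio sp s < (sp.length : Int) := by
  unfold pvPrio
  cases hi : PySem.List.index? sp s with
  | none => exact absurd ((PySem.List.index?_eq_none_iff sp s).mp hi) (by simpa using h)
  | some k =>
    obtain ⟨hk, -, -⟩ := PySem.List.getElem_of_index?_eq_some hi
    simp only []
    omega

theorem pvPrio_eq_len_iff (sp : List String) (s : String) :
    pvPrio sp s = (sp.length : Int) ↔ s ∉ sp := by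
  constructor
  · intro h hmem
    have := pvPrio_lt_of_mem sp s hmem
    omega
  · intro h
    unfold pvPrio
    rw [(PySem.List.index?_eq_none_iff sp s).mpr h]

-- key step: for an entry whose priority is already known ≥ |pre|, matching the
-- next target sp[|pre|] is the same as having priority exactly |pre|
theorem match_target_iff (pre ts : List String) (t s : String)
    (hinv : ((pre.length : Int)) ≤ pvPrio (pre ++ t :: ts) s) :
    (s == t) = (pvPrio (pre ++ t :: ts) s == (pre.length : Int)) := by
  set sp := pre ++ t :: ts with hsp
  have hgt : sp[pre.length]'(by simp [hsp]) = t := by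
    simp [hsp]
  by_cases hst : s = t
  · subst hst
    have hmem : s ∈ sp := by simp [hsp]
    cases hi : PySem.List.index? sp s with
    | none => exact absurd ((PySem.List.index?_eq_none_iff sp s).mp hi) (by simpa using hmem)
    | some k =>
      obtain ⟨hk, hke, hkmin⟩ := PySem.List.getElem_of_index?_eq_some hi
      have hkle : k ≤ pre.length := by
        by_contra hgtk
        exact hkmin pre.length (by omega) hgt
      have hprio : pvPrio sp s = (k : Int) := by unfold pvPrio; rw [hi]
      rw [hprio] at hinv ⊢
      have : k = pre.length := by omega
      simp [this]
  · have hne : (s == t) = false := by simp [hst]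
    rw [hne]
    by_contra hcon
    have hpe : pvPrio sp s = (pre.length : Int) := by
      by_contra h2
      simp [h2] at hcon
    cases hi : PySem.List.index? sp s with
    | none =>
      unfold pvPrio at hpe
      rw [hi] at hpe
      simp only [] at hpe
      have : pre.length < sp.length := by simp [hsp]
      omega
    | some k =>
      obtain ⟨hk, hke, -⟩ := PySem.List.getElem_of_index?_eq_some hi
      have : (k : Int) = (pre.length : Int) := by
        unfold pvPrio at hpe
        rw [hi] at hpe
        simpa using hpe
      have hkp : k = pre.length := by omega
      subst hkp
      rw [hgt] at hke
      exact hst hke.symm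

theorem pvGoB_best (sp : List String) (L : List (String × String)) :
    ∀ (ts pre : List String), sp = pre ++ ts →
      (∀ q ∈ L, ((pre.length : Int)) ≤ pvPrio sp q.1) →
      pvGoB sp L ts = pvBest sp L := by
  intro ts
  induction ts with
  | nil =>
    intro pre hsp hinv
    have hpre : pre = sp := by simpa using hsp.symm
    subst hpre
    rw [pvGoB]
    have hcg : L.find? (fun p => !pre.contains p.1)
        = L.find? (fun p => pvPrio pre p.1 == (pre.length : Int)) := by
      apply find?_congr_mem
      intro q _
      by_cases hmem : q.1 ∈ pre
      · have h1 := pvPrio_lt_of_mem pre q.1 hmem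
        have h2 : (pvPrio pre q.1 == (pre.length : Int)) = false := by
          simp only [beq_eq_false_iff_ne, ne_eq]
          omega
        simp [hmem, h2]
      · have h1 := (pvPrio_eq_len_iff pre q.1).mpr hmem
        simp [hmem, h1]
    rw [hcg]
    cases hfind : L.find? (fun p => pvPrio pre p.1 == (pre.length : Int)) with
    | some q =>
      have hqmem := List.mem_of_find?_eq_some hfind
      have hqp : pvPrio pre q.1 = (pre.length : Int) := by
        have := List.find?_some hfind
        simpa using this
      have hmin : pvMin pre L ((pre.length : Int) + 1) = (pre.length : Int) := by
        have hub := pvMin_le_mem pre L ((pre.length : Int) + 1) q hqmem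
        have hlb := pvMin_lb pre L ((pre.length : Int)) ((pre.length : Int) + 1)
          (by omega) hinv
        omega
      unfold pvBest
      simp only [hmin, hfind]
    | none =>
      cases L with
      | nil => rfl
      | cons r L' =>
        exfalso
        have h1 := hinv r (by simp)
        have h2 := pvPrio_le pre r.1
        have h3 := List.find?_eq_none.mp hfind r (by simp)
        simp only [beq_iff_eq] at h3
        exact h3 (by omega)
  | cons t ts ih =>
    intro pre hsp hinv
    rw [pvGoB]
    have hcg : L.find? (fun p => p.1 == t)
        = L.find? (fun p => pvPrio sp p.1 == (pre.length : Int)) := by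
      apply find?_congr_mem
      intro q hq
      have h1 := hinv q hq
      subst hsp
      exact match_target_iff pre ts t q.1 h1
    rw [hcg]
    cases hfind : L.find? (fun p => pvPrio sp p.1 == (pre.length : Int)) with
    | some q =>
      have hqmem := List.mem_of_find?_eq_some hfind
      have hqp : pvPrio sp q.1 = (pre.length : Int) := by
        have := List.find?_some hfind
        simpa using this
      have hplen : (pre.length : Int) ≤ (sp.length : Int) + 1 := by
        rw [hsp]; simp; omega
      have hmin : pvMin sp L ((sp.length : Int) + 1) = (pre.length : Int) := by
        have hub := pvMin_le_mem sp L ((sp.length : Int) + 1) q hqmem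
        have hlb := pvMin_lb sp L ((pre.length : Int)) ((sp.length : Int) + 1)
          hplen hinv
        omega
      unfold pvBest
      simp only [hmin, hfind]
    | none =>
      apply ih (pre ++ [t])
      · rw [hsp]; simp
      · intro q hq
        have h1 := hinv q hq
        have h2 := List.find?_eq_none.mp hfind q hq
        simp only [beq_iff_eq] at h2
        simp only [List.length_append, List.length_cons, List.length_nil]
        push_cast
        omega

-- B = pvBest
theorem portB_best (cuis : List String) (c2d : List (String × List (String × String)))
    (sp : List String) :
    get_best_definition_alt cuis c2d sp = pvBest sp (pvEntries cuis c2d) := by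
  unfold get_best_definition_alt
  rw [pvSearch_eq_goB]
  exact pvGoB_best sp (pvEntries cuis c2d) sp [] rfl
    (fun q _ => by simpa using pvPrio_nonneg sp q.1)

-- ===== VERDICT (by name: the statement is the Claim_ definition above) =====
theorem get_best_definition_spec : Claim_equal_get_best_definition := by
  intro cuis c2d sp _
  unfold Spec_get_best_definition
  rw [portA_best, portB_best]
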